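-- pv_equiv track=rewrite | github.com/Shuso/csc108assginment3 | the_final_check_rhyme_scheme.py | find_rhyme_scheme
-- ===== SOURCE A (Python) =====
-- def find_rhyme_scheme(rhyme_list):
--     """ (list of list of str) - > list of str
--     >>> rhyme_list=[['AO1', 'F'], ['AO1', 'F'],['N', 'EH1', 'K', 'S', 'T'], ['AO1', 'F'],['EH1', 'N', 'D', 'Z']]
--     >>> find_rhyme_scheme(rhyme_list)
--     ['013','013','2','013','4']"""
--     rhyme_scheme=[]
--     same_rhyme=''
--     i=0
--
--     for item in rhyme_list:
--         for i in range(len(rhyme_list)):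
--             if rhyme_list[i]==item:
--                 same_rhyme+=str(i)
--         rhyme_scheme.append(same_rhyme)
--         same_rhyme=''
--
--     return rhyme_scheme
-- ===== SOURCE B (Python) =====
-- def find_rhyme_scheme(rhyme_list):
--     groups = {}
--     for i, item in enumerate(rhyme_list):
--         key = tuple(item)
--         groups[key] = groups.get(key, '') + str(i)
--     return [groups[tuple(item)] for item in rhyme_list]
-- ===== Notes on version B (the rewrite author's own statement) =====
-- stated objective: faster
-- what changed: Replaced the quadratic per-item rescan of the whole list by a single pass that groups indices in a dict keyed by the tuple of the sublist, then one lookup per item.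
import Mathlib
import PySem

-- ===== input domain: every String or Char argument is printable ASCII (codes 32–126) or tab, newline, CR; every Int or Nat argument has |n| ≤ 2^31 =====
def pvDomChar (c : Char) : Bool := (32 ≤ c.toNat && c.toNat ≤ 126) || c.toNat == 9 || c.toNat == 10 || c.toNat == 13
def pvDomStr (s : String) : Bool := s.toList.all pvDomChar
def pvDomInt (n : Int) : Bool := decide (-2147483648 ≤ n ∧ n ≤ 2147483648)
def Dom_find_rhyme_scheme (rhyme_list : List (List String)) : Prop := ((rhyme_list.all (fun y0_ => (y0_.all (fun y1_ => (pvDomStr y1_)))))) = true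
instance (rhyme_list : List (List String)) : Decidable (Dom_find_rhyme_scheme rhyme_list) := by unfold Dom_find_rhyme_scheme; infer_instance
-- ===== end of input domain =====

-- B groups equal sublists in one dict pass instead of rescanning the whole list per item (faster, asymptotic).

-- ===== PORT A =====
def find_rhyme_scheme (rhyme_list : List (List String)) : List String :=
  rhyme_list.foldl
    (fun rhyme_scheme item =>
      let same_rhyme :=
        (PySem.List.pyRange 0 rhyme_list.length 1).foldl
          (fun s i => if PySem.List.pyGet? rhyme_list i = some item then s ++ PySem.Int.toStr i else s) ""
      rhyme_scheme ++ [same_rhyme]) []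

-- ===== PORT B =====
def find_rhyme_scheme_alt (rhyme_list : List (List String)) : List String :=
  let groups : PySem.Dict (List String) String :=
    (PySem.List.enumerate rhyme_list).foldl
      (fun d p => d.modify p.2 "" (fun s => s ++ PySem.Int.toStr p.1)) PySem.Dict.empty
  rhyme_list.map (fun item => groups.getD item "")

-- ===== PRECONDITION & SPEC =====
def Spec_find_rhyme_scheme (rhyme_list : List (List String)) (out : List String) : Prop := out = find_rhyme_scheme_alt rhyme_list
instance (rhyme_list : List (List String)) (out : List String) : Decidable (Spec_find_rhyme_scheme rhyme_list out) := by unfold Spec_find_rhyme_scheme; infer_instance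

-- ===== CLAIM (what is proved, stated in full; the proofs are below) =====
def Claim_equal_find_rhyme_scheme : Prop := ∀ (rhyme_list : List (List String)), Dom_find_rhyme_scheme rhyme_list → Spec_find_rhyme_scheme rhyme_list (find_rhyme_scheme rhyme_list)

-- ===== LEMMAS AND PROOFS =====

-- The dict built by B's loop looks up to the fold of A's string concatenation over the matching pairs.
theorem getD_foldl_modify_strcat (l : List (Int × List String)) (d : PySem.Dict (List String) String) (c : List String) :
    (l.foldl (fun d p => d.modify p.2 "" (fun s => s ++ PySem.Int.toStr p.1)) d).getD c ""
      = (l.filter (fun p => p.2 == c)).foldl (fun s p => s ++ PySem.Int.toStr p.1) (d.getD c "") := by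
  induction l generalizing d with
  | nil => rfl
  | cons p l ih =>
    simp only [List.foldl_cons, List.filter_cons]
    rw [ih, PySem.Dict.getD_modify]
    by_cases h : p.2 = c
    · simp [h]
    · simp [h, Ne.symm h]

-- A's inner index loop is the fold over the matching enumerated pairs (offset version for the induction).
theorem inner_eq_enum (item : List String) :
    ∀ (ys : List (List String)) (a : Int) (s : String), 0 ≤ a →
    (PySem.List.pyRange a (a + ys.length) 1).foldl
        (fun s i => if PySem.List.pyGet? ys (i - a) = some item then s ++ PySem.Int.toStr i else s) s
      = ((PySem.List.enumerate ys a).filter (fun p => p.2 == item)).foldl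
        (fun s p => s ++ PySem.Int.toStr p.1) s := by
  intro ys
  induction ys with
  | nil =>
    intro a s _
    rw [show a + (([] : List (List String)).length : Int) = a by simp,
      PySem.List.pyRange_one_eq_nil le_rfl]
    rfl
  | cons y ys ih =>
    intro a s ha
    have hlt : a < a + ((y :: ys).length : Int) := by simp only [List.length_cons]; push_cast; omega
    rw [PySem.List.pyRange_one_cons hlt, PySem.List.enumerate_cons]
    simp only [List.foldl_cons, List.filter_cons, sub_self, PySem.List.pyGet?_zero_cons]
    have harr : (a + ((y :: ys).length : Int)) = (a + 1) + (ys.length : Int) := by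
      simp only [List.length_cons]; push_cast; omega
    rw [harr]
    have hcong :
        ∀ s0 : String,
        (PySem.List.pyRange (a+1) ((a+1) + ys.length) 1).foldl
          (fun s i => if PySem.List.pyGet? (y :: ys) (i - a) = some item then s ++ PySem.Int.toStr i else s) s0
        = (PySem.List.pyRange (a+1) ((a+1) + ys.length) 1).foldl
          (fun s i => if PySem.List.pyGet? ys (i - (a+1)) = some item then s ++ PySem.Int.toStr i else s) s0 := by
      intro s0
      apply PySem.List.foldl_congr_mem
      intro s' i hi
      have hmem := (PySem.List.mem_pyRange_one).mp hi
      have hkey : PySem.List.pyGet? (y :: ys) (i - a) = PySem.List.pyGet? ys (i - (a+1)) := by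
        have hna : (i - a) = (((i - a).toNat : Nat) : Int) := by omega
        have hnb : (i - (a+1)) = (((i - (a+1)).toNat : Nat) : Int) := by omega
        rw [hna, hnb, PySem.List.pyGet?_natCast, PySem.List.pyGet?_natCast]
        have hsucc : (i - a).toNat = (i - (a+1)).toNat + 1 := by omega
        rw [hsucc]
        simp
      rw [hkey]
    rw [hcong _, ih (a+1) _ (by omega)]
    by_cases hy : y = item
    · simp [hy]
    · simp [hy]

theorem point_eq (xs : List (List String)) (item : List String) :
    (PySem.List.pyRange 0 xs.length 1).foldl
        (fun s i => if PySem.List.pyGet? xs i = some item then s ++ PySem.Int.toStr i else s) ""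
      = ((PySem.List.enumerate xs).foldl
          (fun d p => d.modify p.2 "" (fun s => s ++ PySem.Int.toStr p.1)) PySem.Dict.empty).getD item "" := by
  rw [getD_foldl_modify_strcat, PySem.Dict.getD_empty]
  have := inner_eq_enum item xs 0 "" le_rfl
  simp only [zero_add, sub_zero] at this
  exact this

-- ===== VERDICT (by name: the statement is the Claim_ definition above) =====
theorem find_rhyme_scheme_spec : Claim_equal_find_rhyme_scheme := by
  intro xs _
  unfold Spec_find_rhyme_scheme find_rhyme_scheme find_rhyme_scheme_alt
  rw [PySem.List.foldl_append_singleton_eq_map]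
  apply List.map_congr_left
  intro item _
  exact point_eq xs item
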